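-- pv_equiv track=rewrite | github.com/Trevorvaizel/k2m-edtech-program- | cis-discord-bot/database/pg_store.py | _escape_literal_percents
-- ===== SOURCE A (Python) =====
-- def _escape_literal_percents(sql: str) -> str:
--     """Escape non-placeholder percent signs for psycopg2 (`%%` → literal `%`)."""
--     escaped: list[str] = []
--     idx = 0
--
--     while idx < len(sql):
--         char = sql[idx]
--         if char != "%":
--             escaped.append(char)
--             idx += 1
--             continue
--
--         next_char = sql[idx + 1] if idx + 1 < len(sql) else ""
--         if next_char in {"s", "%"}:
--             escaped.append("%")
--             escaped.append(next_char)
--             idx += 2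
--             continue
--
--         escaped.append("%%")
--         idx += 1
--
--     return "".join(escaped)
-- ===== SOURCE B (Python) =====
-- def _escape_literal_percents(sql: str) -> str:
--     """Escape non-placeholder percent signs for psycopg2 (`%%` -> literal `%`)."""
--     parts = sql.split("%")
--     out = parts[0]
--     i = 1
--     while i < len(parts):
--         p = parts[i]
--         if p == "" and i + 1 < len(parts):
--             # an empty gap between two '%' = an existing '%%' pair: keep it
--             out += "%%" + parts[i + 1]
--             i += 2
--         elif p.startswith("s"):
--             out += "%s" + p[1:]
--             i += 1
--         else:
--             out += "%%" + p
--             i += 1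
--     return out
-- ===== Notes on version B (the rewrite author's own statement) =====
-- stated objective: faster
-- what changed: B replaces A's per-character index-driven scanner with a single str.split on the percent sign and one pass over the resulting segments, pairing an empty segment with its successor (an existing doubled percent) and inspecting only each segment's first character for the placeholder.
import Mathlib
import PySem

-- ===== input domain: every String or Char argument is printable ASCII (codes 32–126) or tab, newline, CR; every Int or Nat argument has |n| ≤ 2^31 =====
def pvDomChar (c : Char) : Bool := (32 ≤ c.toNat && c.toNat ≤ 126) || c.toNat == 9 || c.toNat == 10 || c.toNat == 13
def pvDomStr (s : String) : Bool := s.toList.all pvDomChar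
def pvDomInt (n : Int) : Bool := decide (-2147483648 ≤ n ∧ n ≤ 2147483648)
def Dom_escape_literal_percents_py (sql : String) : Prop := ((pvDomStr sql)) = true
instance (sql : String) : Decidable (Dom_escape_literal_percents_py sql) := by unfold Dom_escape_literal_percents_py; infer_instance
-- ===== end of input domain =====

-- B re-implements A with one str.split('%') and a pair-joining pass instead of an index scanner; same values everywhere (objective: alternative).

-- ===== PORT A =====
-- A's while-idx scanner, transliterated as structural recursion on the characters
-- still to process (idx advances by 1 or 2 exactly as in A; branch order preserved).
def goA : List Char → List Char
  | [] => []
  | c :: rest =>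
    if c ≠ '%' then
      c :: goA rest
    else
      match rest with
      | [] => '%' :: '%' :: goA []          -- next_char = "" : not in {'s','%'}; append "%%", idx += 1
      | n :: rest' =>
        if n = 's' ∨ n = '%' then '%' :: n :: goA rest'   -- keep placeholder / doubled percent, idx += 2
        else '%' :: '%' :: goA (n :: rest')               -- lone '%': escape it, idx += 1

def escape_literal_percents_py (sql : String) : String :=
  String.mk (goA sql.toList)

-- ===== PORT B =====
-- B's while-loop over parts = sql.split('%'): an empty part followed by another part
-- is an existing '%%' pair; otherwise a part starting with 's' is a '%s' placeholder;
-- otherwise the separating '%' was lone and becomes '%%'.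
def goB : List (List Char) → List Char
  | [] => []
  | [] :: q :: rest => '%' :: '%' :: (q ++ goB rest)
  | p :: rest =>
    if p.head? = some 's' then '%' :: 's' :: (p.tail ++ goB rest)
    else '%' :: '%' :: (p ++ goB rest)

def escape_literal_percents_py_alt (sql : String) : String :=
  match PySem.Chars.splitOn sql.toList ['%'] with
  | [] => ""                                  -- unreachable: split never returns []
  | p :: rest => String.mk (p ++ goB rest)

-- ===== PRECONDITION & SPEC =====
def Spec_escape_literal_percents_py (sql : String) (out : String) : Prop := out = escape_literal_percents_py_alt sql
instance (sql : String) (out : String) : Decidable (Spec_escape_literal_percents_py sql out) := by unfold Spec_escape_literal_percents_py; infer_instance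

-- ===== CLAIM (what is proved, stated in full; the proofs are below) =====
def Claim_equal_escape_literal_percents_py : Prop := ∀ (sql : String), Dom_escape_literal_percents_py sql → Spec_escape_literal_percents_py sql (escape_literal_percents_py sql)

-- ===== LEMMAS AND PROOFS =====

-- equation lemmas for A's scanner
theorem goA_cons_ne (c : Char) (l : List Char) (hc : ¬ c = '%') :
    goA (c :: l) = c :: goA l := by
  rw [goA.eq_def]; simp [hc]

theorem goA_pct_nil : goA ['%'] = ['%', '%'] := by
  rw [goA.eq_def]; simp [goA]

theorem goA_pp (l : List Char) : goA ('%' :: '%' :: l) = '%' :: '%' :: goA l := by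
  rw [goA.eq_def]; simp

theorem goA_ps (l : List Char) : goA ('%' :: 's' :: l) = '%' :: 's' :: goA l := by
  rw [goA.eq_def]; simp

theorem goA_lone (d : Char) (l : List Char) (hd : ¬ d = '%') (hs : ¬ d = 's') :
    goA ('%' :: d :: l) = '%' :: '%' :: goA (d :: l) := by
  rw [goA.eq_def]; simp [hd, hs]

-- simple structural model of split-on-'%'
def psplit : List Char → List (List Char)
  | [] => [[]]
  | c :: l =>
    if c = '%' then [] :: psplit l
    else
      match psplit l with
      | [] => [[c]]
      | p :: r => (c :: p) :: r

theorem psplit_ne_nil (l : List Char) : psplit l ≠ [] := by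
  cases l with
  | nil => simp [psplit]
  | cons c l =>
    simp only [psplit]
    split
    · simp
    · split <;> simp

-- go with enough fuel computes acc.reverse ++ (cur.reverse prepended to psplit l)
theorem go_eq_psplit (fuel : Nat) :
    ∀ (l cur : List Char) (acc : List (List Char)), l.length < fuel →
    PySem.Chars.splitOn.go ['%'] fuel l cur acc =
      acc.reverse ++ (match psplit l with
                      | [] => []
                      | p :: r => (cur.reverse ++ p) :: r) := by
  induction fuel with
  | zero => intro l cur acc h; omega
  | succ fuel ih =>
    intro l cur acc h
    cases l with
    | nil =>
      simp [PySem.Chars.splitOn.go, psplit]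
    | cons c rest =>
      have h' : rest.length < fuel := by simp at h; omega
      rcases hps : psplit rest with _ | ⟨p, r⟩
      · exact absurd hps (psplit_ne_nil rest)
      · by_cases hc : c = '%'
        · subst hc
          have hpre : List.isPrefixOf ['%'] ('%' :: rest) = true := by
            simp [List.isPrefixOf]
          have step : PySem.Chars.splitOn.go ['%'] (fuel + 1) ('%' :: rest) cur acc =
              PySem.Chars.splitOn.go ['%'] fuel rest [] (cur.reverse :: acc) := by
            simp [PySem.Chars.splitOn.go, hpre]
          rw [step, ih rest [] _ h', hps]
          simp [psplit, hps]
        · have hpre : List.isPrefixOf ['%'] (c :: rest) = false := by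
            simp [List.isPrefixOf]
            exact fun h => hc h.symm
          have step : PySem.Chars.splitOn.go ['%'] (fuel + 1) (c :: rest) cur acc =
              PySem.Chars.splitOn.go ['%'] fuel rest (c :: cur) acc := by
            simp [PySem.Chars.splitOn.go, hpre]
          rw [step, ih rest (c :: cur) acc h', hps]
          simp [psplit, hc, hps]

theorem splitOn_eq_psplit (l : List Char) :
    PySem.Chars.splitOn l ['%'] = psplit l := by
  show PySem.Chars.splitOn.go ['%'] (l.length + 1) l [] [] = psplit l
  rw [go_eq_psplit (l.length + 1) l [] [] (by omega)]
  rcases hps : psplit l with _ | ⟨p, r⟩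
  · exact absurd hps (psplit_ne_nil l)
  · simp

-- joining B's parts recovers A's scanner output
def bmain (ps : List (List Char)) : List Char :=
  match ps with
  | [] => []
  | p :: rest => p ++ goB rest

theorem bmain_psplit_eq_goA : ∀ (n : Nat) (l : List Char), l.length ≤ n → bmain (psplit l) = goA l := by
  intro n
  induction n with
  | zero =>
    intro l h
    have : l = [] := by cases l <;> simp_all
    subst this; simp [psplit, bmain, goB, goA]
  | succ n ih =>
    intro l h
    cases l with
    | nil => simp [psplit, bmain, goB, goA]
    | cons c l' =>
      by_cases hc : c = '%'
      · subst hc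
        cases l' with
        | nil => simp [psplit, bmain, goB, goA_pct_nil]
        | cons d l'' =>
          rcases hps'' : psplit l'' with _ | ⟨p, r⟩
          · exact absurd hps'' (psplit_ne_nil l'')
          · have hrec := ih l'' (by simp at h; omega)
            rw [hps''] at hrec
            simp only [bmain] at hrec
            by_cases hd : d = '%'
            · subst hd
              have hps : psplit ('%' :: '%' :: l'') = [] :: [] :: p :: r := by
                simp [psplit, hps'']
              rw [hps, goA_pp, ← hrec]
              simp [bmain, goB]
            · by_cases hs : d = 's'
              · subst hs
                have hps : psplit ('%' :: 's' :: l'') = [] :: ('s' :: p) :: r := by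
                  simp [psplit, hps'']
                rw [hps, goA_ps, ← hrec]
                cases r <;> simp [bmain, goB]
              · have hps : psplit ('%' :: d :: l'') = [] :: (d :: p) :: r := by
                  simp [psplit, hd, hps'']
                have hrec' := ih (d :: l'') (by simp at h ⊢; omega)
                have hpsd : psplit (d :: l'') = (d :: p) :: r := by
                  simp [psplit, hd, hps'']
                rw [hpsd] at hrec'
                simp only [bmain] at hrec'
                rw [hps, goA_lone d l'' hd hs, ← hrec']
                cases r <;> simp [bmain, goB, hs]
      · have hrec := ih l' (by simp at h; omega)
        rcases hps' : psplit l' with _ | ⟨p, r⟩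
        · exact absurd hps' (psplit_ne_nil l')
        · rw [hps'] at hrec
          simp only [bmain] at hrec
          have hps : psplit (c :: l') = (c :: p) :: r := by
            simp [psplit, hc, hps']
          rw [hps, goA_cons_ne c l' hc, ← hrec]
          simp [bmain]

-- ===== VERDICT (by name: the statement is the Claim_ definition above) =====
theorem escape_literal_percents_py_spec : Claim_equal_escape_literal_percents_py := by
  intro sql _
  unfold Spec_escape_literal_percents_py escape_literal_percents_py escape_literal_percents_py_alt
  rw [splitOn_eq_psplit]
  rcases hps : psplit sql.toList with _ | ⟨p, r⟩
  · exact absurd hps (psplit_ne_nil sql.toList)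
  · have hm := bmain_psplit_eq_goA sql.toList.length sql.toList le_rfl
    rw [hps] at hm
    simp only [bmain] at hm
    show String.mk (goA sql.toList) = String.mk (p ++ goB r)
    rw [hm]
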